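-- pv_equiv track=rewrite | github.com/sueszli/vector-database-benchmark | dataset/python-mutated/jkrox.py | heterograma
-- ===== SOURCE A (Python) =====
-- def heterograma(palabra: str) -> str:
--     if False:
--         while True:
--             i = 10
--     letras_unicas = set(palabra)
--     if len(palabra) == len(letras_unicas):
--         return f'"{palabra}" Es un heterograma ✅'
--     else:
--         return f'"{palabra}" No es un heterograma ❌'
-- ===== SOURCE B (Python) =====
-- def heterograma(palabra: str) -> str:
--     seen = set()
--     for c in palabra:
--         if c in seen:
--             return f'"{palabra}" No es un heterograma ❌'
--         seen.add(c)
--     return f'"{palabra}" Es un heterograma ✅'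
-- ===== Notes on version B (the rewrite author's own statement) =====
-- stated objective: alternative
-- what changed: Replaces the dead if-False block plus one-shot set(palabra) length comparison with an early-terminating character scan that maintains a seen set and returns the negative message at the first repeated character.
import Mathlib
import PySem

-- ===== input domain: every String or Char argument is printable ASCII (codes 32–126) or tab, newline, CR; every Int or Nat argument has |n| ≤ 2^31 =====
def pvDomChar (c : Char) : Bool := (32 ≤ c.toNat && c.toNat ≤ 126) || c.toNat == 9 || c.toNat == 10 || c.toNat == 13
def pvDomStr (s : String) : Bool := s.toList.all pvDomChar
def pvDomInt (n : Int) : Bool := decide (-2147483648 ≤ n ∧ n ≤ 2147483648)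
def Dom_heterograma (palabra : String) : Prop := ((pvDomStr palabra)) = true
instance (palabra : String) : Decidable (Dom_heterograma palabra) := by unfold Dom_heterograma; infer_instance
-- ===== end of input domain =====

-- B replaces A's dead if-False block and one-shot set-length comparison by an early-terminating scan with a seen set; equal return values proved on Dom.
-- ===== PORT A =====
def heterograma (palabra : String) : String :=
  -- `if False: while True: i = 10` is dead code: no effect
  let letras_unicas : PySem.Set Char := PySem.Set.ofList palabra.toList
  if palabra.toList.length == letras_unicas.length then
    "\"" ++ palabra ++ "\" Es un heterograma ✅"
  else
    "\"" ++ palabra ++ "\" No es un heterograma ❌"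

-- ===== PORT B =====
-- early-terminating scan: `true` iff no character repeats (seen-set loop from Source B)
def heterogramaScan : List Char → PySem.Set Char → Bool
  | [], _ => true
  | c :: rest, seen =>
    if PySem.Set.contains seen c then false
    else heterogramaScan rest (PySem.Set.add seen c)

def heterograma_alt (palabra : String) : String :=
  if heterogramaScan palabra.toList PySem.Set.empty then
    "\"" ++ palabra ++ "\" Es un heterograma ✅"
  else
    "\"" ++ palabra ++ "\" No es un heterograma ❌"

-- ===== PRECONDITION & SPEC =====
def Spec_heterograma (palabra : String) (out : String) : Prop := out = heterograma_alt palabra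
instance (palabra : String) (out : String) : Decidable (Spec_heterograma palabra out) := by unfold Spec_heterograma; infer_instance

-- ===== CLAIM (what is proved, stated in full; the proofs are below) =====
def Claim_equal_heterograma : Prop := ∀ (palabra : String), Dom_heterograma palabra → Spec_heterograma palabra (heterograma palabra)

-- ===== LEMMAS AND PROOFS =====

theorem length_foldl_add_le {α : Type} [BEq α] (l : List α) (s : PySem.Set α) :
    (l.foldl PySem.Set.add s).length ≤ s.length + l.length := by
  induction l generalizing s with
  | nil => simp
  | cons c l ih =>
    simp only [List.foldl_cons, List.length_cons]
    refine (ih _).trans ?_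
    simp only [PySem.Set.add]
    split
    · omega
    · simp; omega

theorem length_foldl_add_iff (l : List Char) (s : PySem.Set Char) :
    (l.foldl PySem.Set.add s).length = s.length + l.length ↔
      (l.Nodup ∧ ∀ c ∈ l, c ∉ s) := by
  induction l generalizing s with
  | nil => simp
  | cons c l ih =>
    simp only [List.foldl_cons, List.length_cons, PySem.Set.add]
    by_cases hc : c ∈ s
    · have hcon : PySem.Set.contains s c = true := by
        simpa [PySem.Set.contains] using hc
      rw [hcon, if_pos rfl]
      constructor
      · intro h
        exfalso
        have := length_foldl_add_le l s
        omega
      · rintro ⟨-, hall⟩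
        exact absurd hc (hall c (by simp))
    · have hcon : PySem.Set.contains s c = false := by
        simpa [PySem.Set.contains] using hc
      rw [hcon, if_neg (by simp)]
      rw [show s.length + (l.length + 1) = (s ++ [c]).length + l.length by simp; omega]
      rw [ih (s ++ [c])]
      constructor
      · rintro ⟨hnd, hall⟩
        have hcl : c ∉ l := by
          intro hmem
          have := hall c hmem
          simp at this
        refine ⟨List.nodup_cons.mpr ⟨hcl, hnd⟩, ?_⟩
        intro x hx hxs
        rcases List.mem_cons.mp hx with rfl | hx'
        · exact hc hxs
        · exact hall x hx' (by simp [hxs])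
      · rintro ⟨hnd, hall⟩
        rw [List.nodup_cons] at hnd
        refine ⟨hnd.2, fun x hx hxs => ?_⟩
        rcases List.mem_append.mp hxs with h1 | h2
        · exact hall x (List.mem_cons.mpr (Or.inr hx)) h1
        · have hxc : x = c := by simpa using h2
          subst hxc
          exact hnd.1 hx

theorem heterogramaScan_iff (l : List Char) (s : PySem.Set Char) :
    heterogramaScan l s = true ↔ (l.Nodup ∧ ∀ c ∈ l, c ∉ s) := by
  induction l generalizing s with
  | nil => simp [heterogramaScan]
  | cons c l ih =>
    simp only [heterogramaScan]
    by_cases hc : c ∈ s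
    · have hcon : PySem.Set.contains s c = true := by
        simpa [PySem.Set.contains] using hc
      rw [hcon, if_pos rfl]
      simp only [Bool.false_eq_true, false_iff]
      rintro ⟨-, hall⟩
      exact hall c (by simp) hc
    · have hcon : PySem.Set.contains s c = false := by
        simpa [PySem.Set.contains] using hc
      rw [hcon, if_neg (by simp), ih]
      simp only [PySem.Set.add, hcon, Bool.false_eq_true, ite_false]
      constructor
      · rintro ⟨hnd, hall⟩
        have hcl : c ∉ l := by
          intro hmem
          have := hall c hmem
          simp at this
        refine ⟨List.nodup_cons.mpr ⟨hcl, hnd⟩, ?_⟩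
        intro x hx hxs
        rcases List.mem_cons.mp hx with rfl | hx'
        · exact hc hxs
        · exact hall x hx' (by simp [hxs])
      · rintro ⟨hnd, hall⟩
        rw [List.nodup_cons] at hnd
        refine ⟨hnd.2, fun x hx hxs => ?_⟩
        rcases List.mem_append.mp hxs with h1 | h2
        · exact hall x (List.mem_cons.mpr (Or.inr hx)) h1
        · have hxc : x = c := by simpa using h2
          subst hxc
          exact hnd.1 hx

theorem cond_eq (l : List Char) :
    (l.length == (PySem.Set.ofList l).length) = heterogramaScan l PySem.Set.empty := by
  rcases h : heterogramaScan l PySem.Set.empty with _ | _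
  · rw [beq_eq_false_iff_ne]
    intro hlen
    have hiff := heterogramaScan_iff l PySem.Set.empty
    rw [h] at hiff
    simp only [Bool.false_eq_true, false_iff] at hiff
    apply hiff
    rw [← length_foldl_add_iff l PySem.Set.empty]
    simpa [PySem.Set.ofList_eq_foldl, PySem.Set.empty] using hlen.symm
  · rw [heterogramaScan_iff] at h
    have := (length_foldl_add_iff l PySem.Set.empty).mpr h
    simp only [PySem.Set.empty, List.length_nil, Nat.zero_add] at this
    rw [PySem.Set.ofList_eq_foldl]
    exact beq_iff_eq.mpr this.symm

-- ===== VERDICT (by name: the statement is the Claim_ definition above) =====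
theorem heterograma_spec : Claim_equal_heterograma := by
  intro palabra _
  simp only [Spec_heterograma, heterograma, heterograma_alt, cond_eq]
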